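-- pv_equiv track=rewrite | github.com/Jingwenkuang/rosalind-solutions | bioinformatic/BoyerMooreExercise.py | naive_with_counts
-- ===== SOURCE A (Python) =====
-- def naive_with_counts(p, t):
--     occurrences = []
--     num_alignments = 0
--     num_char_comparisions = 0
--     for i in range(len(t) - len(p) + 1):
--         num_alignments += 1
--         match = True
--         for j in range(len(p)):
--             num_char_comparisions += 1
--             if t[i + j] != p[j]:
--                 match = False
--                 break
--         if match:
--             occurrences.append(i)
--     # return occurrences, num_alignments, num_char_comparisions
--     return num_char_comparisions
-- ===== SOURCE B (Python) =====
-- def naive_with_counts(p, t):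
--     # Z-algorithm: per-alignment LCP of p with t[i:]; comparisons per alignment = min(lcp, m-1) + 1
--     m, n = len(p), len(t)
--     if m == 0 or m > n:
--         return 0
--     zp = [0] * m
--     zp[0] = m
--     l = r = 0
--     for i in range(1, m):
--         z = min(r - i, zp[i - l]) if i < r else 0
--         while i + z < m and p[z] == p[i + z]:
--             z += 1
--         zp[i] = z
--         if i + z > r:
--             l, r = i, i + z
--     total = 0
--     l = r = 0
--     for i in range(n - m + 1):
--         z = min(r - i, zp[i - l]) if i < r else 0
--         while z < m and i + z < n and p[z] == t[i + z]:
--             z += 1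
--         if i + z > r:
--             l, r = i, i + z
--         total += min(z, m - 1) + 1
--     return total
-- ===== Notes on version B (the rewrite author's own statement) =====
-- stated objective: alternative
-- what changed: Replaces the alignment-by-alignment rescan with the Z-algorithm: it precomputes Z-values of the pattern, derives each alignment's LCP with the text from a maintained match window, and sums min(lcp, m-1)+1 comparisons per alignment.
import Mathlib
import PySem

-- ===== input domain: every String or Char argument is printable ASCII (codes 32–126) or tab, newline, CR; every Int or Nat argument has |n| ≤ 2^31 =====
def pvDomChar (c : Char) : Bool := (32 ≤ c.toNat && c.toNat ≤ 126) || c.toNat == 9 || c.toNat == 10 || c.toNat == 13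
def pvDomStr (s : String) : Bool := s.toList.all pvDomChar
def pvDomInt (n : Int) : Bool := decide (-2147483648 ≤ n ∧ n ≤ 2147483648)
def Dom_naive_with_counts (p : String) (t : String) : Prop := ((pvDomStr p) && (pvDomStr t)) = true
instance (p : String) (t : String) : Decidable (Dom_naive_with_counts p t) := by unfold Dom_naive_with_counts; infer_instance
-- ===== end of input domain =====

-- B replaces A's alignment-by-alignment rescan by the Z-algorithm (per-alignment LCP
-- lengths derived from a maintained match window), summing min(lcp, m-1)+1 per alignment.

-- ===== PORT A =====
-- inner loop: for j in range(len(p)): ncc += 1; if t[i+j] != p[j]: break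
-- (indexing t[i+j] is always in range for the alignments A enumerates, so getD is exact)
def pvAInner (T P : List Char) (i : Nat) : List Nat → Int → Int × Bool
  | [], ncc => (ncc, true)
  | j :: js, ncc =>
    if T.getD (i + j) ' ' ≠ P.getD j ' ' then (ncc + 1, false)
    else pvAInner T P i js (ncc + 1)

-- outer loop, carrying occurrences / num_alignments / num_char_comparisions as in A
def pvAOuter (T P : List Char) : List Nat → List Int → Int → Int → Int
  | [], _occ, _na, ncc => ncc
  | i :: is, occ, na, ncc =>
    let res := pvAInner T P i (List.range P.length) ncc
    pvAOuter T P is (if res.2 then occ ++ [(i : Int)] else occ) (na + 1) res.1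

def naive_with_counts (p : String) (t : String) : Int :=
  pvAOuter t.toList p.toList (List.range (t.toList.length + 1 - p.toList.length)) [] 0 0

-- ===== PORT B =====
-- while i + z < m and p[z] == p[i+z]: z += 1
def pvWhile1 (P : List Char) (i z : Nat) : Nat :=
  if h : i + z < P.length ∧ P.getD z ' ' = P.getD (i + z) ' ' then pvWhile1 P i (z + 1) else z
  termination_by P.length - (i + z)
  decreasing_by omega

-- while z < m and i + z < n and p[z] == t[i+z]: z += 1
def pvWhile2 (P T : List Char) (i z : Nat) : Nat :=
  if h : z < P.length ∧ i + z < T.length ∧ P.getD z ' ' = T.getD (i + z) ' ' then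
    pvWhile2 P T i (z + 1)
  else z
  termination_by P.length - z
  decreasing_by omega

-- first loop of B: Z-values of the pattern
def pvZLoop (P : List Char) : List Nat → List Nat → Nat → Nat → List Nat × Nat × Nat
  | [], zp, l, r => (zp, l, r)
  | i :: is, zp, l, r =>
    let z0 := if i < r then min (r - i) (zp.getD (i - l) 0) else 0
    let z := pvWhile1 P i z0
    let zp' := zp.set i z
    if i + z > r then pvZLoop P is zp' i (i + z) else pvZLoop P is zp' l r

-- second loop of B: match lengths of the pattern against the text, summing comparisons
def pvSLoop (P T : List Char) (zp : List Nat) : List Nat → Nat → Nat → Int → Int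
  | [], _l, _r, total => total
  | i :: is, l, r, total =>
    let z0 := if i < r then min (r - i) (zp.getD (i - l) 0) else 0
    let z := pvWhile2 P T i z0
    let total' := total + ((min z (P.length - 1) + 1 : Nat) : Int)
    if i + z > r then pvSLoop P T zp is i (i + z) total' else pvSLoop P T zp is l r total'

def naive_with_counts_alt (p : String) (t : String) : Int :=
  let P := p.toList
  let T := t.toList
  let m := P.length
  let n := T.length
  if m = 0 ∨ n < m then 0
  else
    let zp0 := (List.replicate m 0).set 0 m
    let res := pvZLoop P (List.range' 1 (m - 1)) zp0 0 0
    pvSLoop P T res.1 (List.range (n + 1 - m)) 0 0 0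

-- ===== PRECONDITION & SPEC =====
def Spec_naive_with_counts (p : String) (t : String) (out : Int) : Prop := out = naive_with_counts_alt p t
instance (p : String) (t : String) (out : Int) : Decidable (Spec_naive_with_counts p t out) := by unfold Spec_naive_with_counts; infer_instance

-- ===== CLAIM (what is proved, stated in full; the proofs are below) =====
def Claim_equal_naive_with_counts : Prop := ∀ (p : String) (t : String), Dom_naive_with_counts p t → Spec_naive_with_counts p t (naive_with_counts p t)

-- ===== LEMMAS AND PROOFS =====

-- length of the longest common prefix
def lcp : List Char → List Char → Nat
  | a :: as, b :: bs => if a = b then lcp as bs + 1 else 0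
  | _, _ => 0

theorem lcp_le_left : ∀ (a b : List Char), lcp a b ≤ a.length := by
  intro a
  induction a with
  | nil => intro b; cases b <;> simp [lcp]
  | cons x as ih =>
    intro b
    cases b with
    | nil => simp [lcp]
    | cons y bs =>
      simp only [lcp]
      split
      · have := ih bs; simp; omega
      · simp

theorem lcp_le_right : ∀ (a b : List Char), lcp a b ≤ b.length := by
  intro a
  induction a with
  | nil => intro b; cases b <;> simp [lcp]
  | cons x as ih =>
    intro b
    cases b with
    | nil => simp [lcp]
    | cons y bs =>
      simp only [lcp]
      split
      · have := ih bs; simp; omega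
      · simp

theorem lcp_self : ∀ (a : List Char), lcp a a = a.length := by
  intro a
  induction a with
  | nil => simp [lcp]
  | cons x as ih => simp [lcp, ih]

theorem take_eq_of_le_lcp : ∀ (a b : List Char) (k : Nat), k ≤ lcp a b → a.take k = b.take k := by
  intro a
  induction a with
  | nil =>
    intro b k hk
    cases b <;> simp [lcp] at hk <;> simp [hk]
  | cons x as ih =>
    intro b k hk
    cases b with
    | nil => simp [lcp] at hk; simp [hk]
    | cons y bs =>
      simp only [lcp] at hk
      cases k with
      | zero => simp
      | succ k =>
        by_cases h : x = y
        · rw [if_pos h] at hk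
          simp [h, List.take_succ_cons]
          exact ih bs k (by omega)
        · rw [if_neg h] at hk; omega

theorem lcp_ge_of_take : ∀ (a b : List Char) (k : Nat),
    k ≤ a.length → k ≤ b.length → a.take k = b.take k → k ≤ lcp a b := by
  intro a
  induction a with
  | nil => intro b k h1 _ _; simp at h1; omega
  | cons x as ih =>
    intro b k h1 h2 h3
    cases b with
    | nil => simp at h2; omega
    | cons y bs =>
      cases k with
      | zero => omega
      | succ k =>
        simp [List.take_succ_cons] at h3
        obtain ⟨hxy, ht⟩ := h3
        simp only [lcp, if_pos hxy]
        have := ih bs k (by simp at h1; omega) (by simp at h2; omega) ht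
        omega

theorem getD_eq_of_lt_lcp : ∀ (a b : List Char) (k : Nat) (d : Char),
    k < lcp a b → a.getD k d = b.getD k d := by
  intro a
  induction a with
  | nil => intro b k d h; cases b <;> simp [lcp] at h
  | cons x as ih =>
    intro b k d h
    cases b with
    | nil => simp [lcp] at h
    | cons y bs =>
      simp only [lcp] at h
      by_cases hxy : x = y
      · rw [if_pos hxy] at h
        cases k with
        | zero => simp [List.getD, hxy]
        | succ k =>
          simp only [List.getD_cons_succ]
          exact ih bs k d (by omega)
      · rw [if_neg hxy] at h; omega

theorem lcp_ne_getD : ∀ (a b : List Char) (d : Char),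
    lcp a b < a.length → lcp a b < b.length → a.getD (lcp a b) d ≠ b.getD (lcp a b) d := by
  intro a
  induction a with
  | nil => intro b d h1 _; simp at h1
  | cons x as ih =>
    intro b d h1 h2
    cases b with
    | nil => simp at h2
    | cons y bs =>
      by_cases hxy : x = y
      · simp only [lcp, if_pos hxy] at *
        simp only [List.getD_cons_succ]
        exact ih bs d (by simp at h1; omega) (by simp at h2; omega)
      · simp only [lcp, if_neg hxy] at *
        simpa [List.getD] using hxy

theorem getD_drop (l : List Char) (i j : Nat) (d : Char) :
    (l.drop i).getD j d = l.getD (i + j) d := by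
  simp [List.getD_eq_getElem?_getD, List.getElem?_drop]

theorem getD_set_self (l : List Nat) (i : Nat) (a : Nat) (h : i < l.length) :
    (l.set i a).getD i 0 = a := by
  simp [List.getD_eq_getElem?_getD, h]

theorem getD_set_ne (l : List Nat) (i j : Nat) (a : Nat) (h : i ≠ j) :
    (l.set i a).getD j 0 = l.getD j 0 := by
  simp [List.getD_eq_getElem?_getD, h]

-- the Z-algorithm window lemma: a matched window transports known pattern self-overlap
theorem zkey (P X : List Char) (l k w : Nat)
    (h1 : w ≤ lcp P (P.drop k)) (h2 : k + w ≤ lcp P (X.drop l)) :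
    w ≤ lcp P (X.drop (l + k)) := by
  have hPl := lcp_le_left P (X.drop l)
  have hPr := lcp_le_right P (X.drop l)
  have hlen : k + w ≤ P.length := le_trans h2 hPl
  have hlen2 : k + w ≤ X.length - l := by
    have := le_trans h2 hPr; simpa [List.length_drop] using this
  have htake : P.take (k + w) = (X.drop l).take (k + w) := take_eq_of_le_lcp _ _ _ h2
  apply lcp_ge_of_take
  · omega
  · simp [List.length_drop]
    omega
  · have eA : (P.take (k + w)).drop k = (P.drop k).take w := by
      rw [List.drop_take]; congr 1; omega
    have eB : ((X.drop l).take (k + w)).drop k = ((X.drop l).drop k).take w := by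
      rw [List.drop_take]; congr 1; omega
    have eC : (X.drop l).drop k = X.drop (l + k) := by
      rw [List.drop_drop]
    have e5 : (P.drop k).take w = P.take w := (take_eq_of_le_lcp _ _ _ h1).symm
    rw [← e5, ← eA, htake, eB, eC]

-- the while loops compute exactly the LCP when started below it
theorem pvWhile1_spec (P : List Char) (i : Nat) :
    ∀ d z0, lcp P (P.drop i) - z0 = d → z0 ≤ lcp P (P.drop i) → pvWhile1 P i z0 = lcp P (P.drop i) := by
  intro d
  induction d with
  | zero =>
    intro z0 hd hle
    have hz : z0 = lcp P (P.drop i) := by omega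
    rw [pvWhile1]
    split
    · rename_i h
      exfalso
      have hlen : z0 < (P.drop i).length := by simp [List.length_drop]; omega
      have hlenP : z0 < P.length := by simp [List.length_drop] at hlen; omega
      have hne := lcp_ne_getD P (P.drop i) ' ' (by omega) (by omega)
      rw [← hz] at hne
      rw [getD_drop] at hne
      exact hne h.2
    · exact hz
  | succ d ih =>
    intro z0 hd hle
    have hz : z0 < lcp P (P.drop i) := by omega
    have hlen : z0 < (P.drop i).length := lt_of_lt_of_le hz (lcp_le_right _ _)
    have hlenP : z0 < P.length := lt_of_lt_of_le hz (lcp_le_left _ _)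
    have hiz : i + z0 < P.length := by simp [List.length_drop] at hlen; omega
    have heq : P.getD z0 ' ' = P.getD (i + z0) ' ' := by
      have := getD_eq_of_lt_lcp P (P.drop i) z0 ' ' hz
      rwa [getD_drop] at this
    rw [pvWhile1]
    rw [dif_pos ⟨hiz, heq⟩]
    exact ih (z0 + 1) (by omega) (by omega)

theorem pvWhile2_spec (P T : List Char) (i : Nat) :
    ∀ d z0, lcp P (T.drop i) - z0 = d → z0 ≤ lcp P (T.drop i) → pvWhile2 P T i z0 = lcp P (T.drop i) := by
  intro d
  induction d with
  | zero =>
    intro z0 hd hle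
    have hz : z0 = lcp P (T.drop i) := by omega
    rw [pvWhile2]
    split
    · rename_i h
      exfalso
      have hlen : z0 < (T.drop i).length := by simp [List.length_drop]; omega
      have hne := lcp_ne_getD P (T.drop i) ' ' (by omega) (by omega)
      rw [← hz] at hne
      rw [getD_drop] at hne
      exact hne h.2.2
    · exact hz
  | succ d ih =>
    intro z0 hd hle
    have hz : z0 < lcp P (T.drop i) := by omega
    have hlen : z0 < (T.drop i).length := lt_of_lt_of_le hz (lcp_le_right _ _)
    have hlenP : z0 < P.length := lt_of_lt_of_le hz (lcp_le_left _ _)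
    have hiz : i + z0 < T.length := by simp [List.length_drop] at hlen; omega
    have heq : P.getD z0 ' ' = T.getD (i + z0) ' ' := by
      have := getD_eq_of_lt_lcp P (T.drop i) z0 ' ' hz
      rwa [getD_drop] at this
    rw [pvWhile2]
    rw [dif_pos ⟨hlenP, hiz, heq⟩]
    exact ih (z0 + 1) (by omega) (by omega)

-- the z0 seed is sound: it never exceeds the true LCP at position i
theorem z0_sound (P X : List Char) (zp : List Nat) (l r i : Nat)
    (hli : l ≤ i)
    (hwin : r ≤ l + lcp P (X.drop l))
    (hzpk : zp.getD (i - l) 0 = lcp P (P.drop (i - l))) (hir : i < r) :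
    min (r - i) (zp.getD (i - l) 0) ≤ lcp P (X.drop i) := by
  rw [hzpk]
  have h2 : (i - l) + min (r - i) (lcp P (P.drop (i - l))) ≤ lcp P (X.drop l) := by omega
  have hz := zkey P X l (i - l) (min (r - i) (lcp P (P.drop (i - l)))) (by omega) h2
  have hli2 : l + (i - l) = i := by omega
  rwa [hli2] at hz

-- loop 1 invariant: pvZLoop fills zp with the pattern's LCP values
theorem zloop_spec (P : List Char) :
    ∀ c i0 zp l r,
      i0 + c = P.length → 1 ≤ i0 →
      zp.length = P.length →
      (∀ k, k < i0 → zp.getD k 0 = lcp P (P.drop k)) →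
      l < i0 → (1 ≤ l ∨ r = 0) → r ≤ l + lcp P (P.drop l) →
      ∀ k, k < P.length → (pvZLoop P (List.range' i0 c) zp l r).1.getD k 0 = lcp P (P.drop k) := by
  intro c
  induction c with
  | zero =>
    intro i0 zp l r hc h1 hlen hzp hl hl1 hwin k hk
    simp only [List.range'_zero, pvZLoop]
    exact hzp k (by omega)
  | succ c ih =>
    intro i0 zp l r hc h1 hlen hzp hl hl1 hwin k hk
    rw [List.range'_succ]
    simp only [pvZLoop]
    have hz0 : (if i0 < r then min (r - i0) (zp.getD (i0 - l) 0) else 0) ≤ lcp P (P.drop i0) := by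
      split
      · rename_i hir
        have hl1' : 1 ≤ l := by omega
        exact z0_sound P P zp l r i0 (by omega) hwin (hzp (i0 - l) (by omega)) hir
      · omega
    have hzw : pvWhile1 P i0 (if i0 < r then min (r - i0) (zp.getD (i0 - l) 0) else 0) =
        lcp P (P.drop i0) := pvWhile1_spec P i0 _ _ rfl hz0
    rw [hzw]
    have hset : ∀ k', k' < i0 + 1 →
        (zp.set i0 (lcp P (P.drop i0))).getD k' 0 = lcp P (P.drop k') := by
      intro k' hk'
      by_cases he : k' = i0
      · subst he
        exact getD_set_self zp k' _ (by omega)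
      · rw [getD_set_ne zp i0 k' _ (fun h => he h.symm)]
        exact hzp k' (by omega)
    by_cases hbr : i0 + lcp P (P.drop i0) > r
    · rw [if_pos hbr]
      exact ih (i0 + 1) _ i0 _ (by omega) (by omega) (by simp [hlen]) hset (by omega)
        (Or.inl h1) (by omega) k hk
    · rw [if_neg hbr]
      exact ih (i0 + 1) _ l r (by omega) (by omega) (by simp [hlen]) hset (by omega)
        hl1 hwin k hk

-- per-alignment comparison cost
def costI (P T : List Char) (i : Nat) : Int := ((min (lcp P (T.drop i)) (P.length - 1) + 1 : Nat) : Int)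

-- loop 2 invariant: pvSLoop sums the per-alignment costs
theorem sloop_spec (P T : List Char) (zp : List Nat)
    (hzp : ∀ k, k < P.length → zp.getD k 0 = lcp P (P.drop k)) :
    ∀ c i0 l r total, l ≤ i0 → r ≤ l + lcp P (T.drop l) →
      pvSLoop P T zp (List.range' i0 c) l r total =
        total + ((List.range' i0 c).map (costI P T)).sum := by
  intro c
  induction c with
  | zero =>
    intro i0 l r total hl hwin
    simp [pvSLoop]
  | succ c ih =>
    intro i0 l r total hl hwin
    rw [List.range'_succ]
    simp only [pvSLoop]
    have hz0 : (if i0 < r then min (r - i0) (zp.getD (i0 - l) 0) else 0) ≤ lcp P (T.drop i0) := by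
      split
      · rename_i hir
        have hkm : i0 - l < P.length := by
          have h1 := lcp_le_left P (T.drop l); omega
        exact z0_sound P T zp l r i0 hl hwin (hzp _ hkm) hir
      · omega
    have hzw : pvWhile2 P T i0 (if i0 < r then min (r - i0) (zp.getD (i0 - l) 0) else 0) =
        lcp P (T.drop i0) := pvWhile2_spec P T i0 _ _ rfl hz0
    rw [hzw]
    by_cases hbr : i0 + lcp P (T.drop i0) > r
    · rw [if_pos hbr]
      rw [ih (i0 + 1) i0 _ _ (by omega) (by omega)]
      simp only [List.map_cons, List.sum_cons, costI]
      ring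
    · rw [if_neg hbr]
      rw [ih (i0 + 1) l r _ (by omega) hwin]
      simp only [List.map_cons, List.sum_cons, costI]
      ring

-- A's inner loop counts min(lcp, m-1)+1 comparisons and reports whether all matched
theorem aInner_spec (T P : List Char) (i : Nat) (hin : i + P.length ≤ T.length) :
    ∀ d j0 c, P.length - j0 = d → j0 ≤ P.length → j0 ≤ lcp P (T.drop i) →
      pvAInner T P i (List.range' j0 (P.length - j0)) c =
        (c + (((if lcp P (T.drop i) < P.length then lcp P (T.drop i) - j0 + 1
                else P.length - j0) : Nat) : Int),
         decide (P.length ≤ lcp P (T.drop i))) := by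
  intro d
  induction d with
  | zero =>
    intro j0 c hd hj hjl
    have hL := lcp_le_left P (T.drop i)
    have hj0 : j0 = P.length := by omega
    have hLm : lcp P (T.drop i) = P.length := by omega
    rw [hd]
    simp only [List.range'_zero, pvAInner]
    rw [if_neg (by omega)]
    simp [hLm]
  | succ d ih =>
    intro j0 c hd hj hjl
    have hL := lcp_le_left P (T.drop i)
    have hjm : j0 < P.length := by omega
    rw [hd, List.range'_succ]
    simp only [pvAInner]
    by_cases hlt : j0 < lcp P (T.drop i)
    · have heq : T.getD (i + j0) ' ' = P.getD j0 ' ' := by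
        have := getD_eq_of_lt_lcp P (T.drop i) j0 ' ' hlt
        rw [getD_drop] at this
        exact this.symm
      rw [if_neg (not_ne_iff.mpr heq)]
      have hrec := ih (j0 + 1) (c + 1) (by omega) (by omega) (by omega)
      rw [show P.length - (j0 + 1) = d from by omega] at hrec
      rw [hrec]
      simp only [Prod.mk.injEq, and_true]
      split_ifs <;> omega
    · -- j0 = lcp: mismatch here
      have hj0L : j0 = lcp P (T.drop i) := by omega
      have hLm : lcp P (T.drop i) < P.length := by omega
      have hLn : lcp P (T.drop i) < (T.drop i).length := by
        simp only [List.length_drop]; omega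
      have hne := lcp_ne_getD P (T.drop i) ' ' hLm hLn
      rw [getD_drop] at hne
      rw [if_pos (by rw [← hj0L] at hne; exact fun h => hne h.symm)]
      rw [if_pos hLm]
      have h1 : lcp P (T.drop i) - j0 + 1 = 1 := by omega
      rw [h1]
      simp [decide_eq_false (by omega : ¬ P.length ≤ lcp P (T.drop i))]

-- A's outer loop sums the per-alignment costs
theorem aOuter_spec (T P : List Char) (hm : 1 ≤ P.length) :
    ∀ c i0 occ na cnt, (∀ i ∈ List.range' i0 c, i + P.length ≤ T.length) →
      pvAOuter T P (List.range' i0 c) occ na cnt =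
        cnt + ((List.range' i0 c).map (costI P T)).sum := by
  intro c
  induction c with
  | zero =>
    intro i0 occ na cnt hdom
    simp [pvAOuter]
  | succ c ih =>
    intro i0 occ na cnt hdom
    rw [List.range'_succ]
    simp only [pvAOuter]
    have hin : i0 + P.length ≤ T.length := hdom i0 (by rw [List.range'_succ]; simp)
    have hL := lcp_le_left P (T.drop i0)
    have hinner := aInner_spec T P i0 hin P.length 0 cnt (by omega) (by omega) (by omega)
    simp only [Nat.sub_zero] at hinner
    rw [← List.range_eq_range'] at hinner
    rw [hinner]
    rw [ih (i0 + 1) _ _ _ (fun i hi => hdom i (by rw [List.range'_succ]; simp [hi]))]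
    simp only [List.map_cons, List.sum_cons, costI]
    have hcost : (if lcp P (T.drop i0) < P.length then lcp P (T.drop i0) + 1
        else P.length) = min (lcp P (T.drop i0)) (P.length - 1) + 1 := by
      split <;> omega
    rw [hcost]
    ring

theorem aOuter_nil (T : List Char) :
    ∀ is occ na cnt, pvAOuter T [] is occ na cnt = cnt := by
  intro is
  induction is with
  | nil => intro occ na cnt; simp [pvAOuter]
  | cons i is ih =>
    intro occ na cnt
    simp only [pvAOuter, List.length_nil, List.range_zero, pvAInner]
    exact ih _ _ _

-- ===== VERDICT (by name: the statement is the Claim_ definition above) =====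
theorem naive_with_counts_spec : Claim_equal_naive_with_counts := by
  unfold Claim_equal_naive_with_counts Spec_naive_with_counts
  intro p t _
  unfold naive_with_counts naive_with_counts_alt
  simp only []
  by_cases hm0 : p.toList.length = 0
  · have hP : p.toList = [] := List.length_eq_zero_iff.mp hm0
    rw [hP]
    rw [aOuter_nil]
    rw [if_pos (Or.inl (by simp))]
  · by_cases hmn : t.toList.length < p.toList.length
    · have h0 : t.toList.length + 1 - p.toList.length = 0 := by omega
      rw [h0]
      simp only [List.range_zero, pvAOuter]
      rw [if_pos (Or.inr hmn)]
    · have hm : 1 ≤ p.toList.length := by omega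
      have hnm : p.toList.length ≤ t.toList.length := by omega
      rw [if_neg (by rintro (h | h) <;> omega)]
      have hzp0len : ((List.replicate p.toList.length 0).set 0 p.toList.length).length =
          p.toList.length := by simp
      have hzp0 : ∀ k, k < 1 →
          ((List.replicate p.toList.length 0).set 0 p.toList.length).getD k 0 =
            lcp p.toList (p.toList.drop k) := by
        intro k hk
        have hk0 : k = 0 := by omega
        subst hk0
        rw [getD_set_self _ _ _ (by rw [List.length_replicate]; omega)]
        simp [lcp_self]
      have hzp := zloop_spec p.toList (p.toList.length - 1) 1
        ((List.replicate p.toList.length 0).set 0 p.toList.length) 0 0 (by omega) (by omega)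
        hzp0len hzp0 (by omega) (Or.inr rfl) (by simp)
      rw [List.range_eq_range']
      rw [aOuter_spec t.toList p.toList hm (t.toList.length + 1 - p.toList.length) 0 [] 0 0
        (by intro i hi; rw [List.mem_range'_1] at hi; omega)]
      rw [sloop_spec p.toList t.toList _ hzp (t.toList.length + 1 - p.toList.length) 0 0 0 0
        (by omega) (by simp)]
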